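-- pv_equiv track=rewrite | github.com/ivanzuev78/IvanZuev_EPAM_final_task | Data/sort_hotels_data.py | sort_hotels_by_countries_and_cities
-- ===== SOURCE A (Python) =====
-- from typing import Dict, List, Tuple
--
-- def sort_hotels_by_countries_and_cities(hotels: List[Dict]) -> Dict:
--     """
--     Get list of hotels and returns dict of this data:
--     Dict structure:
--     {'Country's name': {'City's name': [hotels]} }
--     :param hotels:
--     :return:
--     """
--     hotels_dict = {}
--     for hotel in hotels:
--         if hotel["Country"] not in hotels_dict:
--             hotels_dict[hotel["Country"]] = {hotel["City"]: []}
--         elif hotel["City"] not in hotels_dict[hotel["Country"]]: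
--             hotels_dict[hotel["Country"]][hotel["City"]] = []
--         hotels_dict[hotel["Country"]][hotel["City"]].append(hotel)
--     return hotels_dict
-- ===== SOURCE B (Python) =====
-- def sort_hotels_by_countries_and_cities(hotels):
--     """Same grouping built by comprehensions: dedup the country/city names in
--     first-seen order with dict.fromkeys, then collect each group with a filter pass."""
--     countries = dict.fromkeys(h["Country"] for h in hotels)
--     return {
--         country: {
--             city: [h for h in hotels if h["Country"] == country and h["City"] == city]
--             for city in dict.fromkeys(h["City"] for h in hotels if h["Country"] == country)
--         }
--         for country in countries
--     }
-- ===== Notes on version B (the rewrite author's own statement) =====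
-- stated objective: alternative
-- what changed: A builds the nested dict incrementally with per-hotel membership checks and in-place appends; B instead dedups the country and city names in first-seen order with dict.fromkeys and builds the whole structure declaratively with nested comprehensions, collecting each (country, city) group by a filter pass over the input.
import Mathlib
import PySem

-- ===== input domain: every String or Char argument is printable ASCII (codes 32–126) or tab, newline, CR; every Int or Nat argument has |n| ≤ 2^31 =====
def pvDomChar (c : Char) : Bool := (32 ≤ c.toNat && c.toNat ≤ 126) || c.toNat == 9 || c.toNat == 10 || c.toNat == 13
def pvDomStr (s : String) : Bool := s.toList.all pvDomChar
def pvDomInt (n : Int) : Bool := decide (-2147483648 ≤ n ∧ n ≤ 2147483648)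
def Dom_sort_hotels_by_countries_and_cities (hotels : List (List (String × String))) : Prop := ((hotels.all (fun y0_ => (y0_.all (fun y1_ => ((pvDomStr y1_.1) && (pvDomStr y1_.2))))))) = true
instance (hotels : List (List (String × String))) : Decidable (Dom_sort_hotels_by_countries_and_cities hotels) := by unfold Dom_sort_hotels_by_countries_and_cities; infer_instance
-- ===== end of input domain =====

-- B replaces A's incremental dict-building (membership checks + in-place appends) by a
-- declarative construction: dedup the country/city names in first-seen order, then collect
-- each (country, city) group with a filter pass — an alternative decomposition, not faster.


-- hotel["Country"] / hotel["City"]: a hotel is a Python dict = association list, lookup is the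
-- first match; the .getD "" default is never reached on inputs satisfying Pre_ (key present).
def pvKey (h : List (String × String)) (k : String) : String :=
  ((PySem.Dict.mk h).get? k).getD ""

-- ===== PORT A =====
-- one iteration of A's loop body, literally: the two membership branches, then the append
def pvStepA (d : PySem.Dict String (PySem.Dict String (List (List (String × String)))))
    (h : List (String × String)) :
    PySem.Dict String (PySem.Dict String (List (List (String × String)))) :=
  let c := pvKey h "Country"
  let t := pvKey h "City"
  let d1 :=
    if d.contains c = false then
      d.insert c (PySem.Dict.mk [(t, ([] : List (List (String × String))))])
    else if (d.getD c PySem.Dict.empty).contains t = false then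
      d.insert c ((d.getD c PySem.Dict.empty).insert t [])
    else d
  d1.modify c PySem.Dict.empty (fun inner => inner.modify t [] (fun l => l ++ [h]))

def sort_hotels_by_countries_and_cities (hotels : List (List (String × String))) :
    List (String × List (String × List (List (String × String)))) :=
  ((hotels.foldl pvStepA PySem.Dict.empty).items).map (fun p => (p.1, p.2.items))

-- ===== PORT B =====
-- dict.fromkeys(... for h in ...) = first-occurrence dedup = PySem.List.dedup
def pvCities (hotels : List (List (String × String))) (c : String) : List String :=
  PySem.List.dedup ((hotels.filter (fun h => pvKey h "Country" == c)).map (fun h => pvKey h "City"))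

def sort_hotels_by_countries_and_cities_alt (hotels : List (List (String × String))) :
    List (String × List (String × List (List (String × String)))) :=
  (PySem.List.dedup (hotels.map (fun h => pvKey h "Country"))).map (fun c =>
    (c, (pvCities hotels c).map (fun t =>
      (t, hotels.filter (fun h => pvKey h "Country" == c && pvKey h "City" == t)))))

-- ===== PRECONDITION & SPEC =====
-- Pre_ excludes exactly the hotels missing a "Country" or "City" key, on which Python A raises KeyError.
def Pre_sort_hotels_by_countries_and_cities (hotels : List (List (String × String))) : Prop :=
  ∀ h ∈ hotels, (PySem.Dict.mk h).contains "Country" = true ∧ (PySem.Dict.mk h).contains "City" = true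
instance (hotels : List (List (String × String))) : Decidable (Pre_sort_hotels_by_countries_and_cities hotels) := by unfold Pre_sort_hotels_by_countries_and_cities; infer_instance

def pvWitness_sort_hotels_by_countries_and_cities : (List (List (String × String))) :=
  [[("Country", "FR"), ("City", "Paris"), ("Name", "H1")],
   [("Country", "FR"), ("City", "Lyon"), ("Name", "H2")],
   [("Country", "FR"), ("City", "Paris"), ("Name", "H3")]]

def Spec_sort_hotels_by_countries_and_cities (hotels : List (List (String × String))) (out : List (String × List (String × List (List (String × String))))) : Prop := out = sort_hotels_by_countries_and_cities_alt hotels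
instance (hotels : List (List (String × String))) (out : List (String × List (String × List (List (String × String))))) : Decidable (Spec_sort_hotels_by_countries_and_cities hotels out) := by
  unfold Spec_sort_hotels_by_countries_and_cities
  haveI : DecidableEq (List (String × List (List (String × String)))) := fun a b => by infer_instance
  infer_instance

-- ===== CLAIM (what is proved, stated in full; the proofs are below) =====
def Claim_equal_sort_hotels_by_countries_and_cities : Prop := ∀ (hotels : List (List (String × String))), Dom_sort_hotels_by_countries_and_cities hotels → Pre_sort_hotels_by_countries_and_cities hotels → Spec_sort_hotels_by_countries_and_cities hotels (sort_hotels_by_countries_and_cities hotels)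

-- ===== LEMMAS AND PROOFS =====

-- A's loop body, simplified to a single nested insert (the three branches collapse).
theorem pvStepA_eq (d : PySem.Dict String (PySem.Dict String (List (List (String × String)))))
    (h : List (String × String)) :
    pvStepA d h =
      d.insert (pvKey h "Country")
        ((d.getD (pvKey h "Country") PySem.Dict.empty).insert (pvKey h "City")
          ((d.getD (pvKey h "Country") PySem.Dict.empty).getD (pvKey h "City") [] ++ [h])) := by
  simp only [pvStepA]
  set c := pvKey h "Country"
  set t := pvKey h "City"
  by_cases hc : d.contains c = false
  · rw [if_pos hc]
    have hmk : (PySem.Dict.mk [(t, ([] : List (List (String × String))))]) =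
        PySem.Dict.empty.insert t [] := rfl
    simp only [hmk, PySem.Dict.modify, PySem.Dict.getD_insert_self,
      PySem.Dict.getD_of_not_contains d _ hc, PySem.Dict.getD_empty,
      PySem.Dict.insert_insert_self]
  · rw [if_neg hc]
    by_cases ht : (d.getD c PySem.Dict.empty).contains t = false
    · rw [if_pos ht]
      simp only [PySem.Dict.modify, PySem.Dict.getD_insert_self,
        PySem.Dict.insert_insert_self, PySem.Dict.getD_of_not_contains _ _ ht]
    · rw [if_neg ht]
      simp only [PySem.Dict.modify]

-- the filter in B restricted by a hotel whose country differs
theorem filter_append_one {α : Type} (l : List α) (h : α) (p : α → Bool) :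
    (l ++ [h]).filter p = l.filter p ++ (if p h then [h] else []) := by
  simp [List.filter_append]; split <;> simp_all

-- The loop invariant: after folding A's loop body over l, the dict's keys are the deduped
-- countries, each inner dict's keys are the deduped cities of that country, each inner value
-- is the filtered group, and all key lists are Nodup.
theorem pvFold_inv (l : List (List (String × String))) :
    (l.foldl pvStepA PySem.Dict.empty).keys = PySem.List.dedup (l.map (fun h => pvKey h "Country"))
    ∧ (l.foldl pvStepA PySem.Dict.empty).keys.Nodup
    ∧ ∀ c, ((l.foldl pvStepA PySem.Dict.empty).getD c PySem.Dict.empty).keys = pvCities l c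
      ∧ ((l.foldl pvStepA PySem.Dict.empty).getD c PySem.Dict.empty).keys.Nodup
      ∧ ∀ t, (((l.foldl pvStepA PySem.Dict.empty).getD c PySem.Dict.empty).getD t []) =
          l.filter (fun h => pvKey h "Country" == c && pvKey h "City" == t) := by
  induction l using List.reverseRecOn with
  | nil =>
    refine ⟨rfl, by simp [PySem.Dict.keys_empty], fun c => ⟨rfl, ?_, fun t => rfl⟩⟩
    simp [PySem.Dict.getD_empty, PySem.Dict.keys_empty]
  | append_singleton l h ih =>
    obtain ⟨hk, hnd, hin⟩ := ih
    set D := l.foldl pvStepA PySem.Dict.empty with hD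
    have hfold : (l ++ [h]).foldl pvStepA PySem.Dict.empty = pvStepA D h := by
      rw [List.foldl_append, ← hD]; rfl
    set c0 := pvKey h "Country" with hc0
    set t0 := pvKey h "City" with ht0
    set inner := D.getD c0 PySem.Dict.empty with hinner
    have hstep : (l ++ [h]).foldl pvStepA PySem.Dict.empty =
        D.insert c0 (inner.insert t0 (inner.getD t0 [] ++ [h])) := by
      rw [hfold, pvStepA_eq]
    have hconkeys : D.contains c0 = decide (c0 ∈ D.keys) := PySem.Dict.contains_eq_decide_mem_keys D c0
    refine ⟨?_, ?_, ?_⟩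
    · -- keys
      rw [hstep, List.map_append]
      simp only [List.map_cons, List.map_nil]
      rw [PySem.List.dedup, PySem.Set.ofList_append_singleton, ← PySem.List.dedup, ← hk]
      by_cases hmem : c0 ∈ D.keys
      · rw [PySem.Dict.keys_insert_of_contains _ _ (by simp [hconkeys, hmem])]
        simp only [PySem.Set.add, ← hc0]
        rw [if_pos (by simpa using hmem)]
      · rw [PySem.Dict.keys_insert_of_not_contains _ _ (by simp [hconkeys, hmem])]
        simp only [PySem.Set.add, ← hc0]
        rw [if_neg (by simpa using hmem)]
    · -- nodup
      rw [hstep]; exact PySem.Dict.nodup_keys_insert _ _ _ hnd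
    · intro c
      obtain ⟨hck, hcnd, hcv⟩ := hin c
      by_cases hcc : c = c0
      · subst hcc
        have hgd : ((l ++ [h]).foldl pvStepA PySem.Dict.empty).getD c0 PySem.Dict.empty =
            inner.insert t0 (inner.getD t0 [] ++ [h]) := by
          rw [hstep, PySem.Dict.getD_insert_self]
        have hcities : pvCities (l ++ [h]) c0 =
            PySem.Set.add (pvCities l c0) t0 := by
          unfold pvCities
          rw [filter_append_one, ← hc0]
          simp only [beq_self_eq_true, if_true, List.map_append, List.map_cons, List.map_nil, ← ht0]
          rw [PySem.List.dedup, PySem.Set.ofList_append_singleton, ← PySem.List.dedup]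
        have hconin : inner.contains t0 = decide (t0 ∈ inner.keys) :=
          PySem.Dict.contains_eq_decide_mem_keys inner t0
        refine ⟨?_, ?_, ?_⟩
        · rw [hgd, hcities, ← hck]
          by_cases hmem : t0 ∈ inner.keys
          · rw [PySem.Dict.keys_insert_of_contains _ _ (by simp [hconin, hmem])]
            simp only [PySem.Set.add]
            rw [if_pos (by simpa using hmem)]
          · rw [PySem.Dict.keys_insert_of_not_contains _ _ (by simp [hconin, hmem])]
            simp only [PySem.Set.add]
            rw [if_neg (by simpa using hmem)]
        · rw [hgd]; exact PySem.Dict.nodup_keys_insert _ _ _ hcnd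
        · intro t
          rw [hgd, filter_append_one]
          by_cases htt : t = t0
          · subst htt
            rw [PySem.Dict.getD_insert_self, if_pos (by simp [← hc0, ← ht0]), hinner, hcv t0]
          · rw [PySem.Dict.getD_insert_of_ne _ _ _ (fun e => htt e),
                if_neg (by simp [← hc0, ← ht0]; exact fun e => htt e.symm),
                List.append_nil, hinner, hcv t]
      · -- c ≠ c0 : nothing changes for country c
        have hgd : ((l ++ [h]).foldl pvStepA PySem.Dict.empty).getD c PySem.Dict.empty =
            D.getD c PySem.Dict.empty := by
          rw [hstep, PySem.Dict.getD_insert_of_ne _ _ _ hcc]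
        have hpc : (pvKey h "Country" == c) = false := by
          simp [beq_eq_false_iff_ne]; exact fun e => hcc e.symm
        have hcity : pvCities (l ++ [h]) c = pvCities l c := by
          unfold pvCities; rw [filter_append_one]; simp [hpc]
        refine ⟨by rw [hgd, hcity]; exact hck, by rw [hgd]; exact hcnd, fun t => ?_⟩
        rw [hgd, filter_append_one]
        simp [hpc, hcv t]

-- ===== VERDICT (by name: the statement is the Claim_ definition above) =====
theorem sort_hotels_by_countries_and_cities_spec : Claim_equal_sort_hotels_by_countries_and_cities := by
  intro hotels _ _
  unfold Spec_sort_hotels_by_countries_and_cities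
  obtain ⟨hk, hnd, hin⟩ := pvFold_inv hotels
  unfold sort_hotels_by_countries_and_cities sort_hotels_by_countries_and_cities_alt
  rw [PySem.Dict.items_eq_map_keys _ hnd PySem.Dict.empty, hk, List.map_map]
  apply List.map_congr_left
  intro c _
  obtain ⟨hck, hcnd, hcv⟩ := hin c
  simp only [Function.comp]
  rw [PySem.Dict.items_eq_map_keys _ hcnd ([] : List (List (String × String))), hck]
  refine congrArg _ (List.map_congr_left fun t _ => ?_)
  rw [hcv t]
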